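-- pv_equiv track=rewrite | github.com/Heetshah21/pythonclg | temp3.py | segerigate_marks
-- ===== SOURCE A (Python) =====
-- def segerigate_marks(lst):
--     A_Grade=[]
--     B_Grade=[]
--     C_Grade=[]
--     for i in lst:
--         if i >= 80:
--             A_Grade.append(i)
--         elif i >= 50 and i < 80:
--             B_Grade.append(i)
--         else:
--             C_Grade.append(i)
--     return A_Grade, B_Grade, C_Grade
-- ===== SOURCE B (Python) =====
-- def segerigate_marks(lst):
--     A_Grade = [i for i in lst if i >= 80]
--     B_Grade = [i for i in lst if 50 <= i < 80]
--     C_Grade = [i for i in lst if i < 50]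
--     return A_Grade, B_Grade, C_Grade
-- ===== Notes on version B (the rewrite author's own statement) =====
-- stated objective: idiomatic
-- what changed: Replaces the single accumulating loop with an if/elif/else chain by three independent filtering comprehensions, one per grade band.
import Mathlib
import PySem

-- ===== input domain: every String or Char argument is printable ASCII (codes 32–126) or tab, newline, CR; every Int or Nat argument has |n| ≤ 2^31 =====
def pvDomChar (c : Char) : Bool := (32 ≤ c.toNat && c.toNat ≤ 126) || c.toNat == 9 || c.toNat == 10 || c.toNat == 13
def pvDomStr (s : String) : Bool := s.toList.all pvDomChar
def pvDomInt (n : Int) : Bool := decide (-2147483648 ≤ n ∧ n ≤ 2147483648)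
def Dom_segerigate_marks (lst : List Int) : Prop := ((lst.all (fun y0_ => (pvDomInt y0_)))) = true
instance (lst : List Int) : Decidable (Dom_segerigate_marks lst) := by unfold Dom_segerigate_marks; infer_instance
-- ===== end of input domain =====

-- B replaces A's single loop with three independent filtering passes, one per grade band (idiomatic).

-- ===== PORT A =====
-- single fold over the list carrying the three accumulators, appending per branch
def segerigate_marks (lst : List Int) : List Int × List Int × List Int :=
  lst.foldl
    (fun acc i =>
      if i ≥ 80 then (acc.1 ++ [i], acc.2.1, acc.2.2)
      else if i ≥ 50 ∧ i < 80 then (acc.1, acc.2.1 ++ [i], acc.2.2)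
      else (acc.1, acc.2.1, acc.2.2 ++ [i]))
    ([], [], [])

-- ===== PORT B =====
def segerigate_marks_alt (lst : List Int) : List Int × List Int × List Int :=
  (lst.filter (fun i => i ≥ 80),
   lst.filter (fun i => 50 ≤ i ∧ i < 80),
   lst.filter (fun i => i < 50))

-- ===== PRECONDITION & SPEC =====
def Spec_segerigate_marks (lst : List Int) (out : List Int × List Int × List Int) : Prop := out = segerigate_marks_alt lst
instance (lst : List Int) (out : List Int × List Int × List Int) : Decidable (Spec_segerigate_marks lst out) := by unfold Spec_segerigate_marks; infer_instance

-- ===== CLAIM (what is proved, stated in full; the proofs are below) =====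
def Claim_equal_segerigate_marks : Prop := ∀ (lst : List Int), Dom_segerigate_marks lst → Spec_segerigate_marks lst (segerigate_marks lst)

-- ===== LEMMAS AND PROOFS =====

-- loop invariant: the fold starting from any accumulator appends the three filters
theorem segerigate_fold_inv (lst : List Int) (a b c : List Int) :
    lst.foldl
      (fun acc i =>
        if i ≥ 80 then (acc.1 ++ [i], acc.2.1, acc.2.2)
        else if i ≥ 50 ∧ i < 80 then (acc.1, acc.2.1 ++ [i], acc.2.2)
        else (acc.1, acc.2.1, acc.2.2 ++ [i]))
      (a, b, c)
    = (a ++ lst.filter (fun i => i ≥ 80),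
       b ++ lst.filter (fun i => 50 ≤ i ∧ i < 80),
       c ++ lst.filter (fun i => i < 50)) := by
  induction lst generalizing a b c with
  | nil => simp
  | cons x xs ih =>
    by_cases h1 : x ≥ 80
    · simp [List.foldl, h1, ih, List.filter,
        show ¬(50 ≤ x ∧ x < 80) by omega, show ¬(x < 50) by omega]
    · by_cases h2 : x ≥ 50
      · simp [List.foldl, h1, ih, List.filter,
          show (50 ≤ x ∧ x < 80) by omega, show ¬(x < 50) by omega]
      · simp [List.foldl, h1, ih, List.filter,
          show ¬(50 ≤ x ∧ x < 80) by omega, show (x < 50) by omega]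

-- ===== VERDICT (by name: the statement is the Claim_ definition above) =====
theorem segerigate_marks_spec : Claim_equal_segerigate_marks := by
  intro lst _
  unfold Spec_segerigate_marks segerigate_marks segerigate_marks_alt
  simpa using segerigate_fold_inv lst [] [] []
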